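-- pv_equiv track=rewrite | github.com/Jaspreetkaurr21/MindEase-AI | app.py | detect_stress_level
-- ===== SOURCE A (Python) =====
-- STRESS_WORDS = {"stressed", "anxious", "scored bad", "worried", "sad"}
--
-- CRISIS_WORDS = {"die", "suicide", "kill myself", "end my life", "want to die"}
--
-- def detect_stress_level(user_message):
--     words = set(user_message.lower().split())
--     if any(word in words for word in CRISIS_WORDS):
--         return "CRISIS"
--     elif any(word in words for word in STRESS_WORDS):
--         return "STRESS"
--     else:
--         return "NEUTRAL"
-- ===== SOURCE B (Python) =====
-- STRESS_WORDS = {"stressed", "anxious", "scored bad", "worried", "sad"}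
--
-- CRISIS_WORDS = {"die", "suicide", "kill myself", "end my life", "want to die"}
--
-- def detect_stress_level(user_message):
--     stress_seen = False
--     for word in user_message.lower().split():
--         if word in CRISIS_WORDS:
--             return "CRISIS"
--         if word in STRESS_WORDS:
--             stress_seen = True
--     return "STRESS" if stress_seen else "NEUTRAL"
-- ===== Notes on version B (the rewrite author's own statement) =====
-- stated objective: simpler
-- what changed: Replaces the set() build plus two independent any()-scans over the keyword sets with one early-returning pass over the tokens that returns CRISIS on first hit and remembers a stress flag.
import Mathlib
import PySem

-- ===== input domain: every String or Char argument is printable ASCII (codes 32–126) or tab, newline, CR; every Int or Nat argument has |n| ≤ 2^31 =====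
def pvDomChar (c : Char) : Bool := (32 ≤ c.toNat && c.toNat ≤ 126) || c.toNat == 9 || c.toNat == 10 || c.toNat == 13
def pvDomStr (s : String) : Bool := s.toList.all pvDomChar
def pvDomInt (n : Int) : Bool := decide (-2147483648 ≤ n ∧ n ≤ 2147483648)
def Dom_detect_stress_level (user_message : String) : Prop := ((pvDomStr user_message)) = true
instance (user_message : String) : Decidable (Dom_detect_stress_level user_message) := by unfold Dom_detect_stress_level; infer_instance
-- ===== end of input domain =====

-- B replaces the set() build plus two independent any()-scans with one early-returning
-- pass over the tokens remembering a stress flag (objective: simpler).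

-- ===== PORT A =====
def pvCrisisWords : List String := ["die", "suicide", "kill myself", "end my life", "want to die"]
def pvStressWords : List String := ["stressed", "anxious", "scored bad", "worried", "sad"]

def detect_stress_level (user_message : String) : String :=
  let words : PySem.Set String := PySem.Set.ofList (PySem.Str.split₀ (PySem.Str.lower user_message))
  if pvCrisisWords.any (fun word => PySem.Set.contains words word) then "CRISIS"
  else if pvStressWords.any (fun word => PySem.Set.contains words word) then "STRESS"
  else "NEUTRAL"

-- ===== PORT B =====
-- the 'for word in …: return / set flag' loop of Source B
def pvScan : List String → Bool → String
  | [], stress_seen => if stress_seen then "STRESS" else "NEUTRAL"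
  | word :: rest, stress_seen =>
    if pvCrisisWords.contains word then "CRISIS"
    else pvScan rest (stress_seen || pvStressWords.contains word)

def detect_stress_level_alt (user_message : String) : String :=
  pvScan (PySem.Str.split₀ (PySem.Str.lower user_message)) false

-- ===== PRECONDITION & SPEC =====
def Spec_detect_stress_level (user_message : String) (out : String) : Prop := out = detect_stress_level_alt user_message
instance (user_message : String) (out : String) : Decidable (Spec_detect_stress_level user_message out) := by unfold Spec_detect_stress_level; infer_instance

-- ===== CLAIM (what is proved, stated in full; the proofs are below) =====
def Claim_equal_detect_stress_level : Prop := ∀ (user_message : String), Dom_detect_stress_level user_message → Spec_detect_stress_level user_message (detect_stress_level user_message)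

-- ===== LEMMAS AND PROOFS =====

-- B's single pass, characterised: CRISIS iff some token is a crisis word, else STRESS
-- iff the flag already holds or some token is a stress word.
theorem pvScan_eq (ws : List String) (flag : Bool) :
    pvScan ws flag =
      if ws.any (fun w => pvCrisisWords.contains w) then "CRISIS"
      else if flag || ws.any (fun w => pvStressWords.contains w) then "STRESS"
      else "NEUTRAL" := by
  induction ws generalizing flag with
  | nil => simp [pvScan]
  | cons w rest ih =>
    simp only [pvScan, List.any_cons, ih]
    cases hc : pvCrisisWords.contains w <;>
      simp only [hc, Bool.false_or, Bool.true_or, if_true, Bool.or_assoc] <;>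
      cases hr : rest.any (fun w => pvCrisisWords.contains w) <;>
      simp [hr]

-- the two directions of the membership test agree: ∃ keyword in the token set ↔ ∃ token in the keyword list
theorem pv_any_swap (L ws : List String) :
    L.any (fun w => PySem.Set.contains (PySem.Set.ofList ws) w)
      = ws.any (fun w => L.contains w) := by
  rw [Bool.eq_iff_iff]
  simp only [List.any_eq_true, PySem.Set.contains_iff, PySem.Set.mem_ofList,
    List.contains_eq_mem, decide_eq_true_eq]
  tauto

-- ===== VERDICT (by name: the statement is the Claim_ definition above) =====
theorem detect_stress_level_spec : Claim_equal_detect_stress_level := by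
  intro user_message _
  unfold Spec_detect_stress_level detect_stress_level detect_stress_level_alt
  simp only [pvScan_eq, pv_any_swap, Bool.false_or]
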